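-- pv_equiv track=rewrite | github.com/namiky/pythonTest | indeed/getIndeed.py | getNumberCount
-- ===== SOURCE A (Python) =====
-- def getNumberCount(context,LANG):
--     flgCount= 0 if LANG=="JP" else 2
--     peopleSum=""            # 総求人数を取得。空っぽで宣言
--     prevLiteral=""           #1文字前
--
--     for l in context:  # 1文字ずつ処理
--         if flgCount<0:
--             break
--         elif l == "," or l == "$":  # カンマとドルがSkip
--             pass
--         elif l.isdigit():  # 数字なら
--             if flgCount==0:     #取得対象(総数の数字列のとき）
--                 peopleSum = peopleSum + str(l)
--             else:   #   取得対象外（それいがいの数字列のとき）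
--                 pass
--             prevLiteral=l   # 処理後に今回の文字を保存して次の処理での判定に使用
--         else:   # 文字なら
--             if prevLiteral.isdigit():  # １つ前が数字、今が文字のとき
--                 flgCount -= 1 # FlgCountを１つ下げる（ex)30is6*5のiのタイミング
--             prevLiteral=l   # 処理後に今回の文字を保存して次の処理での判定に使用
--     return peopleSum
-- ===== SOURCE B (Python) =====
-- def getNumberCount(context, LANG):
--     # collect every maximal digit run (ignoring ',' and '$'), then pick the k-th
--     k = 0 if LANG == "JP" else 2
--     groups = []
--     cur = ""
--     for ch in context:
--         if ch == "," or ch == "$":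
--             continue
--         if ch.isdigit():
--             cur += ch
--         else:
--             if cur:
--                 groups.append(cur)
--             cur = ""
--     if cur:
--         groups.append(cur)
--     return groups[k] if k < len(groups) else ""
-- ===== Notes on version B (the rewrite author's own statement) =====
-- stated objective: simpler
-- what changed: A's streaming countdown state machine (flgCount, prevLiteral, early break) is replaced by a collect-then-select pass: gather every maximal digit run (with ',' and '$' skipped) into a list and return the k-th run (k=0 for JP, else 2) or '' if missing.
import Mathlib
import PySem

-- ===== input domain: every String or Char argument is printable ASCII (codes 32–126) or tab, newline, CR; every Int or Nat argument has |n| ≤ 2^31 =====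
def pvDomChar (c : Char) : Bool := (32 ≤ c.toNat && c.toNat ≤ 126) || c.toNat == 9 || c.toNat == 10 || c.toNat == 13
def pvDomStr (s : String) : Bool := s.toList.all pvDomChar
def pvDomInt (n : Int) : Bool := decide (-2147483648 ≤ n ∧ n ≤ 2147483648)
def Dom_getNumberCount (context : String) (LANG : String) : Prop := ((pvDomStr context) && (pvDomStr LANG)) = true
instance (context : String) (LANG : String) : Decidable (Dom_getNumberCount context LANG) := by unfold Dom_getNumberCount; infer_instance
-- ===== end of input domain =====

-- B replaces A's countdown state machine by a collect-all-digit-runs-then-select-the-k-th pass (objective: simpler); same return value everywhere.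

-- ===== PORT A =====
-- A's streaming loop: state = (flgCount, peopleSum, prevLiteral); break when flgCount < 0.
def getNumberCountLoop (cs : List Char) (flgCount : Int) (peopleSum : List Char) (prevLiteral : List Char) : List Char :=
  match cs with
  | [] => peopleSum
  | l :: t =>
    if flgCount < 0 then peopleSum
    else if l == ',' || l == '$' then
      getNumberCountLoop t flgCount peopleSum prevLiteral
    else if PySem.Chars.isdigit l then
      getNumberCountLoop t flgCount (if flgCount == 0 then peopleSum ++ [l] else peopleSum) [l]
    else
      getNumberCountLoop t (if PySem.Chars.strIsdigit prevLiteral then flgCount - 1 else flgCount) peopleSum [l]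

def getNumberCount (context : String) (LANG : String) : String :=
  let flgCount : Int := if LANG == "JP" then 0 else 2
  String.ofList (getNumberCountLoop context.toList flgCount [] [])

-- ===== PORT B =====
-- B's single pass accumulating (groups, cur); ',' and '$' are skipped.
def getNumberCountAltStep (st : List (List Char) × List Char) (ch : Char) : List (List Char) × List Char :=
  if ch == ',' || ch == '$' then st
  else if PySem.Chars.isdigit ch then (st.1, st.2 ++ [ch])
  else if st.2 ≠ [] then (st.1 ++ [st.2], []) else (st.1, [])

def getNumberCount_alt (context : String) (LANG : String) : String :=
  let k : Nat := if LANG == "JP" then 0 else 2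
  let st := context.toList.foldl getNumberCountAltStep ([], [])
  let groups := if st.2 ≠ [] then st.1 ++ [st.2] else st.1
  if k < groups.length then String.ofList (groups.getD k []) else ""

-- ===== PRECONDITION & SPEC =====
def Spec_getNumberCount (context : String) (LANG : String) (out : String) : Prop := out = getNumberCount_alt context LANG
instance (context : String) (LANG : String) (out : String) : Decidable (Spec_getNumberCount context LANG out) := by unfold Spec_getNumberCount; infer_instance

-- ===== CLAIM (what is proved, stated in full; the proofs are below) =====
def Claim_equal_getNumberCount : Prop := ∀ (context : String) (LANG : String), Dom_getNumberCount context LANG → Spec_getNumberCount context LANG (getNumberCount context LANG)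

-- ===== LEMMAS AND PROOFS =====

-- characters A/B do not skip
def pvKeep (c : Char) : Bool := !(c == ',' || c == '$')

-- the maximal digit runs of a character list
def pvRuns : List Char → List (List Char)
  | [] => []
  | c :: t =>
    if PySem.Chars.isdigit c then
      (c :: t.takeWhile PySem.Chars.isdigit) :: pvRuns (t.dropWhile PySem.Chars.isdigit)
    else pvRuns t
termination_by l => l.length
decreasing_by
  · have := List.length_dropWhile_le (p := PySem.Chars.isdigit) (l := t); simp; omega
  · simp

-- closing step of B's pass
def pvFinish (st : List (List Char) × List Char) : List (List Char) :=
  if st.2 ≠ [] then st.1 ++ [st.2] else st.1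

lemma pvRuns_nil : pvRuns [] = [] := by rw [pvRuns]

lemma pvRuns_cons_digit (c : Char) (t : List Char) (h : PySem.Chars.isdigit c = true) :
    pvRuns (c :: t) = (c :: t.takeWhile PySem.Chars.isdigit) :: pvRuns (t.dropWhile PySem.Chars.isdigit) := by
  rw [pvRuns]; simp [h]

lemma pvRuns_cons_other (c : Char) (t : List Char) (h : PySem.Chars.isdigit c = false) :
    pvRuns (c :: t) = pvRuns t := by
  rw [pvRuns]; simp [h]

lemma aloop_neg (l : List Char) (k : Int) (acc prev : List Char) (h : k < 0) :
    getNumberCountLoop l k acc prev = acc := by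
  cases l with
  | nil => rfl
  | cons c t => simp [getNumberCountLoop, h]

lemma aloop_cons_skip (c : Char) (t : List Char) (k : Int) (acc prev : List Char)
    (h1 : ¬ k < 0) (h2 : (c == ',' || c == '$') = true) :
    getNumberCountLoop (c :: t) k acc prev = getNumberCountLoop t k acc prev := by
  simp [getNumberCountLoop, h1, h2]

lemma aloop_cons_digit (c : Char) (t : List Char) (k : Int) (acc prev : List Char)
    (h1 : ¬ k < 0) (h2 : (c == ',' || c == '$') = false) (h3 : PySem.Chars.isdigit c = true) :
    getNumberCountLoop (c :: t) k acc prev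
      = getNumberCountLoop t k (if k == 0 then acc ++ [c] else acc) [c] := by
  simp [getNumberCountLoop, h1, h2, h3]

lemma aloop_cons_other (c : Char) (t : List Char) (k : Int) (acc prev : List Char)
    (h1 : ¬ k < 0) (h2 : (c == ',' || c == '$') = false) (h3 : PySem.Chars.isdigit c = false) :
    getNumberCountLoop (c :: t) k acc prev
      = getNumberCountLoop t (if PySem.Chars.strIsdigit prev then k - 1 else k) acc [c] := by
  simp [getNumberCountLoop, h1, h2, h3]

lemma strIsdigit_singleton (c : Char) : PySem.Chars.strIsdigit [c] = PySem.Chars.isdigit c := by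
  simp [PySem.Chars.strIsdigit]

lemma strIsdigit_nil : PySem.Chars.strIsdigit [] = false := by
  simp [PySem.Chars.strIsdigit]

lemma filter_keep_cons_skip (c : Char) (t : List Char) (h : (c == ',' || c == '$') = true) :
    (c :: t).filter pvKeep = t.filter pvKeep := by
  simp [pvKeep, h]

lemma filter_keep_cons_keep (c : Char) (t : List Char) (h : (c == ',' || c == '$') = false) :
    (c :: t).filter pvKeep = c :: t.filter pvKeep := by
  simp [pvKeep, h]

lemma aloop_runs : ∀ (l : List Char) (k : Int) (acc : List Char), 0 ≤ k →
    (∀ prev, PySem.Chars.strIsdigit prev = false →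
      getNumberCountLoop l k acc prev = acc ++ (pvRuns (l.filter pvKeep)).getD k.toNat [])
    ∧ (∀ prev, PySem.Chars.strIsdigit prev = true →
      getNumberCountLoop l k acc prev = acc ++
        (if k = 0 then (l.filter pvKeep).takeWhile PySem.Chars.isdigit
         else (pvRuns ((l.filter pvKeep).dropWhile PySem.Chars.isdigit)).getD (k - 1).toNat [])) := by
  intro l
  induction l with
  | nil =>
    intro k acc hk
    constructor
    · intro prev _; simp [getNumberCountLoop, pvRuns_nil]
    · intro prev _
      by_cases h0 : k = 0 <;> simp [getNumberCountLoop, pvRuns_nil, h0]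
  | cons c t ih =>
    intro k acc hk
    have hnotneg : ¬ k < 0 := by omega
    cases hskip : (c == ',' || c == '$') with
    | true =>
      -- skipped character: state unchanged, filtered list unchanged
      rw [filter_keep_cons_skip c t hskip]
      constructor
      · intro prev hprev
        rw [aloop_cons_skip c t k acc prev hnotneg hskip, (ih k acc hk).1 prev hprev]
      · intro prev hprev
        rw [aloop_cons_skip c t k acc prev hnotneg hskip, (ih k acc hk).2 prev hprev]
    | false =>
      rw [filter_keep_cons_keep c t hskip]
      cases hd : PySem.Chars.isdigit c with
      | true =>
        -- digit character
        have hsd : PySem.Chars.strIsdigit [c] = true := by rw [strIsdigit_singleton, hd]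
        rw [pvRuns_cons_digit c _ hd]
        constructor
        · intro prev hprev
          rw [aloop_cons_digit c t k acc prev hnotneg hskip hd,
              (ih k _ hk).2 [c] hsd]
          by_cases h0 : k = 0
          · simp [h0]
          · have hkt : k.toNat = (k - 1).toNat + 1 := by omega
            have hb : (k == 0) = false := by simp [h0]
            rw [hb, hkt]
            simp [h0]
        · intro prev hprev
          rw [aloop_cons_digit c t k acc prev hnotneg hskip hd,
              (ih k _ hk).2 [c] hsd]
          by_cases h0 : k = 0
          · simp [h0, hd]
          · have hb : (k == 0) = false := by simp [h0]
            rw [hb]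
            simp [h0, hd]
      | false =>
        -- non-digit, non-skipped character
        have hsd : PySem.Chars.strIsdigit [c] = false := by rw [strIsdigit_singleton, hd]
        rw [pvRuns_cons_other c _ hd]
        constructor
        · intro prev hprev
          rw [aloop_cons_other c t k acc prev hnotneg hskip hd, hprev]
          simp only [if_false, Bool.false_eq_true]
          rw [(ih k acc hk).1 [c] hsd]
        · intro prev hprev
          rw [aloop_cons_other c t k acc prev hnotneg hskip hd, hprev]
          simp only [if_true]
          by_cases h0 : k = 0
          · rw [h0]
            rw [aloop_neg t (0 - 1) acc [c] (by norm_num)]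
            simp [hd]
          · rw [(ih (k - 1) acc (by omega)).1 [c] hsd]
            have hdw : List.dropWhile PySem.Chars.isdigit (c :: List.filter pvKeep t)
                = c :: List.filter pvKeep t := by simp [hd]
            rw [if_neg h0, hdw, pvRuns_cons_other c _ hd]

lemma bstep_skip (st : List (List Char) × List Char) (c : Char)
    (h : (c == ',' || c == '$') = true) : getNumberCountAltStep st c = st := by
  simp [getNumberCountAltStep, h]

lemma bstep_digit (st : List (List Char) × List Char) (c : Char)
    (h1 : (c == ',' || c == '$') = false) (h2 : PySem.Chars.isdigit c = true) :
    getNumberCountAltStep st c = (st.1, st.2 ++ [c]) := by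
  simp [getNumberCountAltStep, h1, h2]

lemma bstep_other (st : List (List Char) × List Char) (c : Char)
    (h1 : (c == ',' || c == '$') = false) (h2 : PySem.Chars.isdigit c = false) :
    getNumberCountAltStep st c = (if st.2 ≠ [] then (st.1 ++ [st.2], []) else (st.1, [])) := by
  simp [getNumberCountAltStep, h1, h2]

lemma bloop_runs : ∀ (l : List Char) (g : List (List Char)) (cur : List Char),
    pvFinish (l.foldl getNumberCountAltStep (g, cur))
    = g ++ (if cur = [] then pvRuns (l.filter pvKeep)
            else (cur ++ (l.filter pvKeep).takeWhile PySem.Chars.isdigit)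
                  :: pvRuns ((l.filter pvKeep).dropWhile PySem.Chars.isdigit)) := by
  intro l
  induction l with
  | nil =>
    intro g cur
    by_cases hc : cur = [] <;> simp [hc, pvFinish, pvRuns_nil]
  | cons c t ih =>
    intro g cur
    rw [List.foldl_cons]
    cases hskip : (c == ',' || c == '$') with
    | true =>
      rw [bstep_skip _ c hskip, ih g cur, filter_keep_cons_skip c t hskip]
    | false =>
      rw [filter_keep_cons_keep c t hskip]
      cases hd : PySem.Chars.isdigit c with
      | true =>
        rw [bstep_digit _ c hskip hd, ih g (cur ++ [c])]
        by_cases hc : cur = []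
        · simp [hc, pvRuns_cons_digit c _ hd]
        · simp [hc, hd]
      | false =>
        rw [bstep_other _ c hskip hd]
        by_cases hc : cur = []
        · rw [if_neg (by simp [hc]), ih g []]
          simp [hc, pvRuns_cons_other c _ hd]
        · rw [if_pos (by simpa using hc), ih (g ++ [cur]) []]
          simp [hc, pvRuns_cons_other c _ hd, hd]

lemma main_eq (context LANG : String) :
    getNumberCount context LANG = getNumberCount_alt context LANG := by
  unfold getNumberCount getNumberCount_alt
  have hB := bloop_runs context.toList [] []
  rw [if_pos rfl] at hB
  simp only [pvFinish, List.nil_append] at hB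
  cases hL : (LANG == "JP") with
  | true =>
    simp only [if_true]
    rw [(aloop_runs context.toList 0 [] (by omega)).1 [] strIsdigit_nil, hB]
    by_cases hlen : 0 < (pvRuns (context.toList.filter pvKeep)).length
    · simp [hlen]
    · have h0 : pvRuns (context.toList.filter pvKeep) = [] := by
        cases h : pvRuns (context.toList.filter pvKeep) <;> simp_all
      simp [h0]
  | false =>
    simp only [Bool.false_eq_true, if_false]
    rw [(aloop_runs context.toList 2 [] (by omega)).1 [] strIsdigit_nil, hB]
    by_cases hlen : 2 < (pvRuns (context.toList.filter pvKeep)).length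
    · simp [hlen]
    · have h2 : (pvRuns (context.toList.filter pvKeep)).getD 2 [] = [] := by
        apply List.getD_eq_default; omega
      rw [if_neg hlen, show ((2 : Int).toNat) = 2 from rfl, h2]
      rfl

-- ===== VERDICT (by name: the statement is the Claim_ definition above) =====
theorem getNumberCount_spec : Claim_equal_getNumberCount := by
  intro context LANG _
  unfold Spec_getNumberCount
  exact main_eq context LANG
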